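-- pv_equiv track=rewrite | github.com/chen-qian-dan/Algorithms_And_Data_Structures_20211227Mon | *InterviewQ/AkunaCapital_20220207Mon/Q3_find_dart_throws.py | find_dart_throws
-- ===== SOURCE A (Python) =====
-- from typing import List
--
-- SCORES = {
--     1: "1",
--     2: "2",
--     3: "3",
--     4: "4",
--     5: "5",
--     6: "6",
--     7: "7",
--     8: "8",
--     9: "9",
--     10: "10",
--     11: "11",
--     12: "12",
--     13: "13",
--     14: "14",
--     15: "15",
--     16: "16",
--     17: "17",
--     18: "18",
--     19: "19",
--     20: "20",
--     21: "t7",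
--     22: "d11",
--     24: "d12",
--     25: "outer",
--     26: "d13",
--     27: "t9",
--     28: "d14",
--     30: "d15",
--     32: "d16",
--     33: "t11",
--     34: "d17",
--     36: "d18",
--     38: "d19",
--     39: "t13",
--     40: "d20",
--     42: "t14",
--     45: "t15",
--     48: "t16",
--     50: "bull",
--     51: "t17",
--     54: "t18",
--     57: "t19",
--     60: "t20",
-- }
--
-- def find_dart_throws(score: int) -> List[str]:
--     # Write your code here
--     if score in SCORES.keys():
--         return [SCORES[score]]
--
--     s = list(SCORES.keys())
--     ret = list()
--     while score > 0:
--         b = find_biggest(s, score)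
--         ret.append(SCORES[b])
--         score -= b
--
--     return ret
--
-- def find_biggest(s: List[int], score: int) -> int:
--     # find the biggest key that < score
--     index = 0
--     for i in range(len(s)-1, -1, -1):
--         if s[i] <= score:
--             index = i
--             break
--     biggest = s[index]
--     return biggest
-- ===== SOURCE B (Python) =====
-- def _is_key(k):
--     # valid single-throw scores: 1..20, outer (25), bull (50),
--     # doubles d11..d20 (even 22..40), triples t7..t20 (multiples of 3 in 21..60)
--     return (1 <= k <= 20 or k == 25 or k == 50
--             or (k % 2 == 0 and 22 <= k <= 40)
--             or (k % 3 == 0 and 21 <= k <= 60))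
--
-- def _label(k):
--     if k == 25:
--         return "outer"
--     if k == 50:
--         return "bull"
--     if k <= 20:
--         return str(k)
--     if k % 2 == 0 and k <= 40:
--         return "d" + str(k // 2)
--     return "t" + str(k // 3)
--
-- def find_dart_throws(score):
--     # table-free greedy: count down over all possible throw values
--     ret = []
--     for k in range(60, 0, -1):
--         if _is_key(k):
--             while score >= k:
--                 ret.append(_label(k))
--                 score -= k
--     return ret
-- ===== Notes on version B (the rewrite author's own statement) =====
-- stated objective: alternative
-- what changed: Drops the SCORES lookup table and A's membership special-case plus per-throw backward rescan (find_biggest) entirely: B counts down over all candidate values 60..1, recognises valid throw values arithmetically (1-20, 25, 50, even 22-40 as doubles, multiples of 3 in 21-60 as triples) and synthesises each label from the value, emitting it while the remaining score still covers it.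
import Mathlib
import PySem

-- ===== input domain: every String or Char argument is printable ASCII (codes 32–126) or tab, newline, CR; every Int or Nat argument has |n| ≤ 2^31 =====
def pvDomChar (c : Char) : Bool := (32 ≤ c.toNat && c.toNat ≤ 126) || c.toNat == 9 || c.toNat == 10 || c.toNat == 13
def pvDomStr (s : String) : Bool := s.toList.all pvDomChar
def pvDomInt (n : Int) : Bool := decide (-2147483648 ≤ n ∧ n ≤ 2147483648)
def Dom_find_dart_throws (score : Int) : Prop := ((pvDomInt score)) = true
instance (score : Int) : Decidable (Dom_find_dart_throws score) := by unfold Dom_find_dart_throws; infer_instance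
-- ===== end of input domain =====

-- B drops the SCORES table and A's per-throw backward key rescan (find_biggest): it counts
-- down over all candidate values 60..1, recognising valid throw values and synthesising
-- their labels arithmetically (objective: alternative).

-- ===== PORT A =====

-- the module-level SCORES dict, in insertion order
def SCORES : PySem.Dict Int String := PySem.Dict.ofList
  [(1, "1"), (2, "2"), (3, "3"), (4, "4"), (5, "5"), (6, "6"), (7, "7"), (8, "8"), (9, "9"),
   (10, "10"), (11, "11"), (12, "12"), (13, "13"), (14, "14"), (15, "15"), (16, "16"),
   (17, "17"), (18, "18"), (19, "19"), (20, "20"), (21, "t7"), (22, "d11"), (24, "d12"),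
   (25, "outer"), (26, "d13"), (27, "t9"), (28, "d14"), (30, "d15"), (32, "d16"),
   (33, "t11"), (34, "d17"), (36, "d18"), (38, "d19"), (39, "t13"), (40, "d20"),
   (42, "t14"), (45, "t15"), (48, "t16"), (50, "bull"), (51, "t17"), (54, "t18"),
   (57, "t19"), (60, "t20")]

-- the 'for i in range(len(s)-1, -1, -1): if s[i] <= score: index = i; break' loop of
-- find_biggest; 'idxs' is the range list, the result is the final value of 'index'
-- (initialised to 0).  The loop only reads s[i] for i produced by the range, which is
-- always in bounds, so pyGetD is exact here.
def fb_loop (s : List Int) (score : Int) : List Int → Int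
  | [] => 0
  | i :: rest => if PySem.List.pyGetD s i 0 ≤ score then i else fb_loop s score rest

def find_biggest (s : List Int) (score : Int) : Int :=
  let index := fb_loop s score (PySem.List.pyRange ((s.length : Int) - 1) (-1) (-1))
  PySem.List.pyGetD s index 0

-- the loop of find_biggest is a find? over the descending index list (cited by loopA's
-- termination proof, so it stays above the port)
theorem fb_loop_find (s : List Int) (r : Int) (l : List Int) :
    fb_loop s r l = (l.find? (fun i => decide (PySem.List.pyGetD s i 0 ≤ r))).getD 0 := by
  induction l with
  | nil => rfl
  | cons i rest ih =>
      rw [fb_loop]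
      by_cases h : PySem.List.pyGetD s i 0 ≤ r
      · rw [if_pos h, List.find?_cons_of_pos (by simpa using h)]; rfl
      · rw [if_neg h, List.find?_cons_of_neg (by simpa using h), ih]

-- find_biggest returns the first element of s.reverse that is ≤ r (s[0] if there is none)
theorem fb_char (s : List Int) (r : Int) :
    find_biggest s r =
      match s.reverse.find? (fun k => decide (k ≤ r)) with
      | some v => v
      | none => PySem.List.pyGetD s 0 0 := by
  unfold find_biggest
  rw [fb_loop_find]
  have h1 : PySem.List.pyRange ((s.length : Int) - 1) (-1) (-1)
      = (PySem.List.pyRange 0 ((s.length : Int)) 1).reverse := by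
    have := PySem.List.pyRange_neg_one_eq_reverse ((s.length : Int) - 1) (-1)
    simpa using this
  have h2 : s.reverse
      = ((PySem.List.pyRange 0 ((s.length : Int)) 1).reverse.map
          (fun j => PySem.List.pyGetD s j 0)) := by
    rw [List.map_reverse, PySem.List.map_pyGetD_pyRange_zero' s 0]
  rw [h1, h2, List.find?_map]
  simp only [Function.comp_def]
  cases h3 : (PySem.List.pyRange 0 ((s.length : Int)) 1).reverse.find?
      (fun j => decide (PySem.List.pyGetD s j 0 ≤ r)) <;> rfl

-- every key of SCORES is at least 1, hence so is find_biggest's result (needed for the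
-- termination of the while loop below)
set_option maxRecDepth 4000 in
theorem fb_pos (r : Int) : 1 ≤ find_biggest SCORES.keys r := by
  rw [fb_char]
  cases hf : SCORES.keys.reverse.find? (fun k => decide (k ≤ r)) with
  | none => decide
  | some v =>
      have hm : v ∈ SCORES.keys.reverse := List.mem_of_find?_eq_some hf
      have hall : ∀ k ∈ SCORES.keys.reverse, (1:Int) ≤ k := by decide
      exact hall v hm

-- the 'while score > 0' loop of A
def loopA (score : Int) : List String :=
  if _h : 0 < score then
    let b := find_biggest SCORES.keys score
    SCORES.getD b "" :: loopA (score - b)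
  else []
termination_by score.toNat
decreasing_by
  have := fb_pos score
  omega

def find_dart_throws (score : Int) : List String :=
  if SCORES.keys.contains score then [SCORES.getD score ""]
  else loopA score

-- ===== PORT B =====

-- valid single-throw scores, recognised arithmetically: 1..20, outer (25), bull (50),
-- doubles d11..d20 (even 22..40), triples t7..t20 (multiples of 3 in 21..60)
def isKeyB (k : Int) : Bool :=
  (1 ≤ k && k ≤ 20) || k == 25 || k == 50 ||
  (PySem.Int.mod k 2 == 0 && 22 ≤ k && k ≤ 40) ||
  (PySem.Int.mod k 3 == 0 && 21 ≤ k && k ≤ 60)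

-- the label of a valid throw value, synthesised from the value
def labelB (k : Int) : String :=
  if k == 25 then "outer"
  else if k == 50 then "bull"
  else if k ≤ 20 then PySem.Int.toStr k
  else if PySem.Int.mod k 2 == 0 && k ≤ 40 then "d" ++ PySem.Int.toStr (PySem.Int.floordiv k 2)
  else "t" ++ PySem.Int.toStr (PySem.Int.floordiv k 3)

-- the 'for k in range(60, 0, -1): if _is_key(k): while score >= k: …' loops of B;
-- the Nat argument is the current value of k (0 = loop finished)
def sweepB : Nat → Int → List String
  | 0, _ => []
  | k+1, score =>
    if _h : isKeyB ((k:Int)+1) = true ∧ ((k:Int)+1) ≤ score then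
      labelB ((k:Int)+1) :: sweepB (k+1) (score - ((k:Int)+1))
    else sweepB k score
termination_by k score => (score.toNat, k)
decreasing_by
  · exact Prod.Lex.left _ _ (by omega)
  · exact Prod.Lex.right _ (by omega)

def find_dart_throws_alt (score : Int) : List String :=
  sweepB 60 score

-- ===== PRECONDITION & SPEC =====
def Spec_find_dart_throws (score : Int) (out : List String) : Prop := out = find_dart_throws_alt score
instance (score : Int) (out : List String) : Decidable (Spec_find_dart_throws score out) := by unfold Spec_find_dart_throws; infer_instance

-- ===== CLAIM (what is proved, stated in full; the proofs are below) =====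
def Claim_equal_find_dart_throws : Prop := ∀ (score : Int), Dom_find_dart_throws score → Spec_find_dart_throws score (find_dart_throws score)

-- ===== LEMMAS AND PROOFS =====

-- the keys of SCORES, descending
def keysDesc : List Int :=
  [60, 57, 54, 51, 50, 48, 45, 42, 40, 39, 38, 36, 34, 33, 32, 30, 28, 27, 26, 25, 24, 22,
   21, 20, 19, 18, 17, 16, 15, 14, 13, 12, 11, 10, 9, 8, 7, 6, 5, 4, 3, 2, 1]

set_option maxRecDepth 4000 in
theorem keys_reverse_eq : SCORES.keys.reverse = keysDesc := by decide

set_option maxRecDepth 4000 in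
theorem mem_keysDesc_pos : ∀ k ∈ keysDesc, (1 : Int) ≤ k := by decide

set_option maxRecDepth 4000 in
theorem mem_keysDesc_le : ∀ k ∈ keysDesc, k ≤ (60 : Int) := by decide

set_option maxRecDepth 4000 in
theorem keysDesc_sorted : keysDesc.Pairwise (· > ·) := by decide

-- B's arithmetic key test agrees with membership in SCORES on 0..60
set_option maxRecDepth 8000 in
theorem isKeyB_iff : ∀ k ∈ List.range 61, isKeyB (k : Int) = decide ((k : Int) ∈ keysDesc) := by
  decide

-- B's synthesised label agrees with the SCORES entry on every key
set_option maxRecDepth 8000 in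
theorem labelB_eq : ∀ k ∈ keysDesc, labelB k = SCORES.getD k "" := by decide

-- when some key of keysDesc is ≤ r, find_biggest returns the first such key
theorem fb_of_find (r v : Int)
    (h : keysDesc.find? (fun k => decide (k ≤ r)) = some v) :
    find_biggest SCORES.keys r = v := by
  rw [fb_char, keys_reverse_eq, h]

-- in a strictly descending list, the first element ≤ r is v itself, provided v is in the
-- list, v ≤ r, and every list element above v exceeds r
theorem find?_desc_first (ks : List Int) (r v : Int) (hs : ks.Pairwise (· > ·))
    (hm : v ∈ ks) (hv : v ≤ r) (habove : ∀ x ∈ ks, v < x → r < x) :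
    ks.find? (fun k => decide (k ≤ r)) = some v := by
  induction ks with
  | nil => cases hm
  | cons k rest ih =>
      rcases List.mem_cons.mp hm with h | h
      · subst h
        rw [List.find?_cons_of_pos (by simpa using hv)]
      · have hkv : v < k := (List.pairwise_cons.mp hs).1 v h
        have hrk : r < k := habove k (by simp) hkv
        rw [List.find?_cons_of_neg (by simpa using by omega)]
        exact ih (List.pairwise_cons.mp hs).2 h (fun x hx => habove x (by simp [hx]))

-- main invariant: if every key above the current counter value k already exceeds r,
-- B's countdown from k equals A's greedy loop
set_option maxRecDepth 8000 in
theorem sweep_eq_loopA (k : Nat) (r : Int) (hk : k ≤ 60)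
    (hpre : ∀ x ∈ keysDesc, (k : Int) < x → r < x) :
    sweepB k r = loopA r := by
  match k with
  | 0 =>
      have h1 : r < 1 := hpre 1 (by decide) (by omega)
      rw [sweepB, loopA, dif_neg (by omega)]
  | k+1 =>
      rw [sweepB]
      by_cases h : isKeyB ((k:Int)+1) = true ∧ ((k:Int)+1) ≤ r
      · rw [dif_pos h]
        have hmem : ((k:Int)+1) ∈ keysDesc := by
          have := isKeyB_iff (k+1) (List.mem_range.mpr (by omega))
          push_cast at this
          rw [h.1] at this
          exact of_decide_eq_true this.symm
        have hfind : keysDesc.find? (fun x => decide (x ≤ r)) = some ((k:Int)+1) :=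
          find?_desc_first keysDesc r ((k:Int)+1) keysDesc_sorted hmem h.2
            (fun x hx hlt => hpre x hx (by push_cast; omega))
        have hb : find_biggest SCORES.keys r = (k:Int)+1 := fb_of_find r _ hfind
        rw [loopA, dif_pos (by omega : 0 < r)]
        simp only [hb]
        rw [labelB_eq _ hmem]
        congr 1
        exact sweep_eq_loopA (k+1) (r - ((k:Int)+1)) hk
          (fun x hx hlt => by
            have := hpre x hx (by push_cast; push_cast at hlt; omega)
            omega)
      · rw [dif_neg h]
        refine sweep_eq_loopA k r (by omega) (fun x hx hlt => ?_)
        by_cases hx1 : x = (k:Int)+1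
        · subst hx1
          have hkey : isKeyB ((k:Int)+1) = true := by
            have h2 := isKeyB_iff (k+1) (List.mem_range.mpr (by omega))
            push_cast at h2
            rw [h2]
            exact decide_eq_true hx
          by_contra hcon
          exact h ⟨hkey, by omega⟩
        · exact hpre x hx (by omega)
termination_by (r.toNat, k)
decreasing_by
  · exact Prod.Lex.left _ _ (by omega)
  · exact Prod.Lex.right _ (by omega)

-- the membership fast path of A agrees with the greedy loop
set_option maxRecDepth 4000 in
theorem loopA_of_mem (r : Int) (hm : SCORES.keys.contains r = true) :
    loopA r = [SCORES.getD r ""] := by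
  have hmem : r ∈ keysDesc := by
    have h1 : r ∈ SCORES.keys := by simpa using hm
    rw [← keys_reverse_eq, List.mem_reverse]
    exact h1
  have hr1 : (1:Int) ≤ r := mem_keysDesc_pos r hmem
  have hb : find_biggest SCORES.keys r = r :=
    fb_of_find r r (find?_desc_first keysDesc r r keysDesc_sorted hmem le_rfl
      (fun x _ hx => hx))
  rw [loopA, dif_pos (by omega : 0 < r)]
  simp only [hb]
  rw [show r - r = 0 by ring, loopA]
  simp

-- ===== VERDICT (by name: the statement is the Claim_ definition above) =====
set_option maxRecDepth 4000 in
theorem find_dart_throws_spec : Claim_equal_find_dart_throws := by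
  intro score _
  unfold Spec_find_dart_throws find_dart_throws find_dart_throws_alt
  rw [sweep_eq_loopA 60 score le_rfl
    (fun x hx hlt => absurd (mem_keysDesc_le x hx) (by omega))]
  by_cases hm : SCORES.keys.contains score = true
  · rw [if_pos hm, loopA_of_mem score hm]
  · rw [if_neg hm]
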